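-- pv_equiv track=rewrite | github.com/Wucheer1/Chinese-Recipe-Flow-Graph | Structuring/utils.py | find_paragraph_index
-- ===== SOURCE A (Python) =====
-- def find_paragraph_index(char_offset, paragraphs):
--     """
--     根据字符偏移量找到对应的段落索引
--
--     参数:
--         char_offset: 字符偏移量
--         paragraphs: 分割后的段落列表
--
--     返回:
--         段落索引(从0开始)，如果找不到返回None
--     """
--     current_pos = 0
--     for i, para in enumerate(paragraphs):
--         para_length = len(para)
--         # 每个段落后面有\n\n，除了最后一个
--         if i < len(paragraphs) - 1:
--             para_length += 2  # 加上\n\n的长度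
--
--         if current_pos <= char_offset < current_pos + para_length:
--             return i
--
--         current_pos += para_length
--
--     return None
-- ===== SOURCE B (Python) =====
-- def find_paragraph_index(char_offset, paragraphs):
--     """Boundary table + binary search instead of the linear accumulate-and-compare scan."""
--     n = len(paragraphs)
--     cur = 0
--     bounds = [0]
--     for i in range(n):
--         cur += len(paragraphs[i]) + (2 if i < n - 1 else 0)
--         bounds.append(cur)
--     total = cur
--     if char_offset < 0 or char_offset >= total:
--         return None
--     # hand-rolled bisect_right (module imports nothing, so no bisect import)
--     lo, hi = 0, len(bounds)
--     while lo < hi: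
--         mid = (lo + hi) // 2
--         if bounds[mid] <= char_offset:
--             lo = mid + 1
--         else:
--             hi = mid
--     return lo - 1
-- ===== Notes on version B (the rewrite author's own statement) =====
-- stated objective: alternative
-- what changed: Replaces the linear accumulate-and-compare scan with a precomputed cumulative boundary table queried by a hand-rolled bisect_right binary search (return insertion point - 1).
import Mathlib
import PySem

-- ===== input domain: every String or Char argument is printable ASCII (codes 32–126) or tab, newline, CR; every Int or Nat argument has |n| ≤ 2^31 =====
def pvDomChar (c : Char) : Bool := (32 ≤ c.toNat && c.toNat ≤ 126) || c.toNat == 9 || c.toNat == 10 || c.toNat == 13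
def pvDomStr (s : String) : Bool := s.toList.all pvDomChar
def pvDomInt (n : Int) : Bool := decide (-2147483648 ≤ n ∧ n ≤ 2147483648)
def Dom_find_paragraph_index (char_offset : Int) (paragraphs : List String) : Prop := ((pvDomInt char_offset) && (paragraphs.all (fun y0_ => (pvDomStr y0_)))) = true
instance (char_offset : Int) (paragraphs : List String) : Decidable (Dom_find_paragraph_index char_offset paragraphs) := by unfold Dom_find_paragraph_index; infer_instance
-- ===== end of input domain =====

-- B replaces A's linear accumulate-and-compare scan by a cumulative boundary table
-- plus a binary search (bisect_right) — an alternative algorithm, same results.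

-- ===== PORT A =====
-- the for-loop of A: i is the enumerate index, cur the running start offset
def pvGoA (char_offset : Int) (n : Nat) : List String → Nat → Int → Option Int
  | [], _, _ => none
  | p :: rest, i, cur =>
    let w : Int := PySem.Str.len p + (if (i : Int) < (n : Int) - 1 then 2 else 0)
    if cur ≤ char_offset ∧ char_offset < cur + w then some (i : Int)
    else pvGoA char_offset n rest (i + 1) (cur + w)

def find_paragraph_index (char_offset : Int) (paragraphs : List String) : Option Int :=
  pvGoA char_offset paragraphs.length paragraphs 0 0

-- ===== PORT B =====
-- Source B's first loop: builds the boundary list and the running total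
def pvBuild (n : Nat) : List String → Nat → Int → List Int → List Int × Int
  | [], _, cur, bounds => (bounds, cur)
  | p :: rest, i, cur, bounds =>
    let c : Int := cur + PySem.Str.len p + (if (i : Int) < (n : Int) - 1 then 2 else 0)
    pvBuild n rest (i + 1) c (bounds ++ [c])

-- Source B's while-loop: bisect_right on bounds
def pvBisect (bounds : List Int) (off : Int) (lo hi : Nat) : Nat :=
  if lo < hi then
    let mid := (lo + hi) / 2
    if bounds.getD mid 0 ≤ off then pvBisect bounds off (mid + 1) hi
    else pvBisect bounds off lo mid
  else lo
termination_by hi - lo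
decreasing_by all_goals omega

def find_paragraph_index_alt (char_offset : Int) (paragraphs : List String) : Option Int :=
  let st := pvBuild paragraphs.length paragraphs 0 0 [0]
  let bounds := st.1
  let total := st.2
  if char_offset < 0 ∨ total ≤ char_offset then none
  else some ((pvBisect bounds char_offset 0 bounds.length : Int) - 1)

-- ===== PRECONDITION & SPEC =====
def Spec_find_paragraph_index (char_offset : Int) (paragraphs : List String) (out : Option Int) : Prop := out = find_paragraph_index_alt char_offset paragraphs
instance (char_offset : Int) (paragraphs : List String) (out : Option Int) : Decidable (Spec_find_paragraph_index char_offset paragraphs out) := by unfold Spec_find_paragraph_index; infer_instance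

-- ===== CLAIM (what is proved, stated in full; the proofs are below) =====
def Claim_equal_find_paragraph_index : Prop := ∀ (char_offset : Int) (paragraphs : List String), Dom_find_paragraph_index char_offset paragraphs → Spec_find_paragraph_index char_offset paragraphs (find_paragraph_index char_offset paragraphs)

-- ===== LEMMAS AND PROOFS =====

-- spec versions of the cumulative boundaries
def pvCums (n : Nat) : List String → Nat → Int → List Int
  | [], _, _ => []
  | p :: rest, i, cur =>
    let c : Int := cur + PySem.Str.len p + (if (i : Int) < (n : Int) - 1 then 2 else 0)
    c :: pvCums n rest (i + 1) c

def pvTotal (n : Nat) (ps : List String) (i : Nat) (cur : Int) : Int :=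
  (pvCums n ps i cur).getLastD cur

theorem pvLen_nonneg (p : String) : (0 : Int) ≤ PySem.Str.len p := by
  simp [PySem.Str.len_eq]

theorem pvBuild_eq (n : Nat) : ∀ (ps : List String) (i : Nat) (cur : Int) (acc : List Int),
    pvBuild n ps i cur acc = (acc ++ pvCums n ps i cur, pvTotal n ps i cur) := by
  intro ps
  induction ps with
  | nil => intro i cur acc; simp [pvBuild, pvCums, pvTotal]
  | cons p rest ih =>
    intro i cur acc
    simp only [pvBuild, pvCums, pvTotal, ih, List.append_assoc, List.singleton_append,
      List.getLastD_cons]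

theorem pvCums_ge (n : Nat) : ∀ (ps : List String) (i : Nat) (cur : Int),
    ∀ x ∈ pvCums n ps i cur, cur ≤ x := by
  intro ps
  induction ps with
  | nil => intro i cur x hx; simp [pvCums] at hx
  | cons p rest ih =>
    intro i cur x hx
    have hw := pvLen_nonneg p
    simp only [pvCums, List.mem_cons] at hx
    rcases hx with h | h
    · subst h; split <;> omega
    · have h2 := ih (i + 1) _ x h
      split at h2 <;> omega

theorem pvPairwise (n : Nat) : ∀ (ps : List String) (i : Nat) (cur : Int),
    List.Pairwise (· ≤ ·) (cur :: pvCums n ps i cur) := by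
  intro ps
  induction ps with
  | nil => intro i cur; simp [pvCums]
  | cons p rest ih =>
    intro i cur
    have hw := pvLen_nonneg p
    simp only [pvCums]
    refine List.pairwise_cons.mpr ⟨?_, ih (i + 1) _⟩
    intro x hx
    simp only [List.mem_cons] at hx
    rcases hx with h | h
    · subst h; split <;> omega
    · have h2 := pvCums_ge n rest (i + 1) _ x h
      split at h2 <;> omega

theorem pvLe_getLastD : ∀ (l : List Int) (a cur : Int), cur ≤ a → (∀ x ∈ l, cur ≤ x) →
    cur ≤ l.getLastD a := by
  intro l
  induction l with
  | nil => intro a cur h _; simpa using h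
  | cons b l' ih =>
    intro a cur h hmem
    rw [List.getLastD_cons]
    exact ih b cur (hmem b (by simp)) (fun x hx => hmem x (by simp [hx]))

def pvCountLE (off : Int) (l : List Int) : Nat := l.countP (fun x => x ≤ off)

theorem pvGoA_neg (off : Int) (n : Nat) : ∀ (ps : List String) (i : Nat) (cur : Int),
    off < cur → pvGoA off n ps i cur = none := by
  intro ps
  induction ps with
  | nil => intro i cur _; rfl
  | cons p rest ih =>
    intro i cur hlt
    have hw := pvLen_nonneg p
    simp only [pvGoA]
    rw [if_neg (by omega), ih]
    split at * <;> omega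

theorem pvGoA_key (off : Int) (n : Nat) : ∀ (ps : List String) (i : Nat) (cur : Int),
    cur ≤ off →
    pvGoA off n ps i cur =
      if off < pvTotal n ps i cur then some ((i : Int) + pvCountLE off (pvCums n ps i cur))
      else none := by
  intro ps
  induction ps with
  | nil =>
    intro i cur hle
    simp only [pvGoA, pvTotal, pvCums, List.getLastD_nil]
    rw [if_neg (by omega)]
  | cons p rest ih =>
    intro i cur hle
    have hw := pvLen_nonneg p
    set w : Int := PySem.Str.len p + (if (i : Int) < (n : Int) - 1 then 2 else 0) with hwdef
    have hw0 : 0 ≤ w := by rw [hwdef]; split <;> omega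
    have hc : pvCums n (p :: rest) i cur = (cur + w) :: pvCums n rest (i + 1) (cur + w) := by
      simp only [pvCums, hwdef]; ring_nf
    have ht : pvTotal n (p :: rest) i cur = (pvCums n rest (i + 1) (cur + w)).getLastD (cur + w) := by
      simp only [pvTotal, hc, List.getLastD_cons]
    have hge := pvCums_ge n rest (i + 1) (cur + w)
    by_cases hcase : off < cur + w
    · -- found here
      have h1 : pvGoA off n (p :: rest) i cur = some (i : Int) := by
        simp only [pvGoA, ← hwdef]
        rw [if_pos ⟨hle, hcase⟩]
      have htot : off < pvTotal n (p :: rest) i cur := by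
        rw [ht]
        exact lt_of_lt_of_le hcase (pvLe_getLastD _ _ _ (le_refl _) hge)
      have hz : List.countP (fun x => decide (x ≤ off)) (pvCums n rest (i + 1) (cur + w)) = 0 := by
        rw [List.countP_eq_zero]
        intro x hx
        have := hge x hx
        simp only [decide_eq_true_eq]
        omega
      have hcount : pvCountLE off (pvCums n (p :: rest) i cur) = 0 := by
        simp only [pvCountLE, hc, List.countP_cons, hz]
        rw [if_neg (by simp only [decide_eq_true_eq]; omega)]
      rw [h1, if_pos htot, hcount]
      simp
    · -- move past this paragraph
      have h1 : pvGoA off n (p :: rest) i cur = pvGoA off n rest (i + 1) (cur + w) := by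
        simp only [pvGoA, ← hwdef]
        rw [if_neg (by omega)]
      rw [h1, ih (i + 1) (cur + w) (by omega)]
      have hcount : pvCountLE off (pvCums n (p :: rest) i cur) =
          pvCountLE off (pvCums n rest (i + 1) (cur + w)) + 1 := by
        simp only [pvCountLE, hc, List.countP_cons]
        rw [if_pos (by simp only [decide_eq_true_eq]; omega)]
      rw [ht, hcount]
      simp only [pvTotal]
      split
      · congr 1; push_cast; ring
      · rfl

theorem pvBisect_spec (bounds : List Int) (off : Int)
    (hmono : ∀ a b : Nat, a ≤ b → b < bounds.length → bounds.getD a 0 ≤ bounds.getD b 0) :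
    ∀ (k lo hi : Nat), lo ≤ hi → hi ≤ bounds.length → hi - lo ≤ k →
      lo ≤ pvBisect bounds off lo hi ∧ pvBisect bounds off lo hi ≤ hi ∧
      (∀ j, lo ≤ j → j < pvBisect bounds off lo hi → bounds.getD j 0 ≤ off) ∧
      (∀ j, pvBisect bounds off lo hi ≤ j → j < hi → off < bounds.getD j 0) := by
  intro k
  induction k with
  | zero =>
    intro lo hi h1 h2 h3
    have : hi = lo := by omega
    subst this
    rw [pvBisect, if_neg (by omega)]
    exact ⟨le_refl _, le_refl _, fun j hj1 hj2 => by omega, fun j hj1 hj2 => by omega⟩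
  | succ k ih =>
    intro lo hi h1 h2 h3
    rw [pvBisect]
    by_cases hlt : lo < hi
    · rw [if_pos hlt]
      set mid := (lo + hi) / 2 with hmid
      have hm1 : lo ≤ mid := by omega
      have hm2 : mid < hi := by omega
      by_cases hcmp : bounds.getD mid 0 ≤ off
      · rw [if_pos hcmp]
        obtain ⟨q1, q2, q3, q4⟩ := ih (mid + 1) hi (by omega) h2 (by omega)
        refine ⟨by omega, q2, ?_, q4⟩
        intro j hj1 hj2
        by_cases hjm : j ≤ mid
        · exact le_trans (hmono j mid hjm (by omega)) hcmp
        · exact q3 j (by omega) hj2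
      · rw [if_neg hcmp]
        obtain ⟨q1, q2, q3, q4⟩ := ih lo mid (by omega) (by omega) (by omega)
        refine ⟨q1, by omega, q3, ?_⟩
        intro j hj1 hj2
        by_cases hjm : mid ≤ j
        · have := hmono mid j hjm (by omega)
          omega
        · exact q4 j hj1 (by omega)
    · rw [if_neg hlt]
      exact ⟨le_refl _, by omega, fun j hj1 hj2 => by omega, fun j hj1 hj2 => by omega⟩

theorem pvCount_of_char (l : List Int) (off : Int) (r : Nat) (hr : r ≤ l.length)
    (h1 : ∀ j, j < r → l.getD j 0 ≤ off)
    (h2 : ∀ j, r ≤ j → j < l.length → off < l.getD j 0) :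
    pvCountLE off l = r := by
  have hsplit : l = l.take r ++ l.drop r := (List.take_append_drop r l).symm
  have hlen : (l.take r).length = r := by simp [hr]
  rw [pvCountLE, hsplit, List.countP_append]
  have hA : (l.take r).countP (fun x => x ≤ off) = r := by
    rw [List.countP_eq_length.mpr, hlen]
    intro x hx
    obtain ⟨j, hj, hget⟩ := List.mem_iff_getElem.mp hx
    rw [List.getElem_take] at hget
    have hjr : j < r := by omega
    have := h1 j hjr
    rw [List.getD_eq_getElem l 0 (by omega), hget] at this
    simpa using this
  have hB : (l.drop r).countP (fun x => x ≤ off) = 0 := by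
    rw [List.countP_eq_zero]
    intro x hx
    obtain ⟨j, hj, hget⟩ := List.mem_iff_getElem.mp hx
    rw [List.getElem_drop] at hget
    have hlen' : r + j < l.length := by
      have := hj; simp [List.length_drop] at this; omega
    have := h2 (r + j) (by omega) hlen'
    rw [List.getD_eq_getElem l 0 hlen', hget] at this
    simp only [decide_eq_true_eq]
    omega
  omega

-- ===== VERDICT (by name: the statement is the Claim_ definition above) =====
theorem find_paragraph_index_spec : Claim_equal_find_paragraph_index := by
  intro off ps _
  unfold Spec_find_paragraph_index find_paragraph_index find_paragraph_index_alt
  set n := ps.length with hn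
  rw [pvBuild_eq]
  simp only [List.singleton_append]
  set cums := pvCums n ps 0 0 with hcums
  set total := pvTotal n ps 0 0 with htotal
  have hpair : List.Pairwise (· ≤ ·) ((0 : Int) :: cums) := pvPairwise n ps 0 0
  have hmono : ∀ a b : Nat, a ≤ b → b < ((0 : Int) :: cums).length →
      ((0 : Int) :: cums).getD a 0 ≤ ((0 : Int) :: cums).getD b 0 := by
    intro a b hab hb
    rcases Nat.lt_or_ge a b with h | h
    · have := (List.pairwise_iff_getElem.mp hpair) a b (by omega) hb h
      rwa [List.getD_eq_getElem _ 0 (by omega), List.getD_eq_getElem _ 0 hb]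
    · have : a = b := by omega
      subst this; rfl
  by_cases hneg : off < 0
  · rw [if_pos (show off < 0 ∨ total ≤ off from Or.inl hneg),
        pvGoA_neg off n ps 0 0 hneg]
  · have hneg' : (0 : Int) ≤ off := by omega
    rw [pvGoA_key off n ps 0 0 hneg', ← hcums, ← htotal]
    by_cases hbig : total ≤ off
    · rw [if_pos (show off < 0 ∨ total ≤ off from Or.inr hbig),
          if_neg (show ¬ off < total by omega)]
    · rw [if_neg (show ¬ (off < 0 ∨ total ≤ off) by omega),
          if_pos (show off < total by omega)]
      set r := pvBisect ((0 : Int) :: cums) off 0 ((0 : Int) :: cums).length with hr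
      obtain ⟨q1, q2, q3, q4⟩ := pvBisect_spec ((0 : Int) :: cums) off hmono
        ((0 : Int) :: cums).length 0 ((0 : Int) :: cums).length (by omega) (le_refl _) (by omega)
      have hcount : pvCountLE off ((0 : Int) :: cums) = r :=
        pvCount_of_char _ off r q2 (fun j hj => q3 j (by omega) hj) q4
      have hsplit : pvCountLE off ((0 : Int) :: cums) = pvCountLE off cums + 1 := by
        simp only [pvCountLE, List.countP_cons]
        rw [if_pos (by simp only [decide_eq_true_eq]; omega)]
      congr 1
      have hre : r = pvCountLE off cums + 1 := by omega
      rw [hre]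
      push_cast
      ring
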